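-- pv_equiv track=rewrite | github.com/r-baggioII/Redes | redes.py | eliminaSecuenciaEscape
-- ===== SOURCE A (Python) =====
-- def eliminaSecuenciaEscape(tramas):
--     newTramas = []
--     for trama in tramas:
--         i = 0
--         while i < len(trama) - 3:  # Aseguramos que haya suficientes elementos para comparar
--             if trama[i] == "7" and trama[i+1] == "D" and trama[i+2] == "7" and trama[i+3] == "E":
--                 del trama[i]  # Elimina "7"
--                 del trama[i]  # Elimina "D",
--             else:
--                 i += 1  # Solo avanzamos si no se eliminó nada
--         newTramas.append(trama)
--     return newTramas
-- ===== SOURCE B (Python) =====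
-- def eliminaSecuenciaEscape(tramas):
--     newTramas = []
--     for trama in tramas:
--         res = []
--         i = 0
--         n = len(trama)
--         while i < n:
--             if trama[i:i+4] == ["7", "D", "7", "E"]:
--                 i += 2
--             else:
--                 res.append(trama[i])
--                 i += 1
--         newTramas.append(res)
--     return newTramas
-- ===== Notes on version B (the rewrite author's own statement) =====
-- stated objective: alternative
-- what changed: A repeatedly deletes the escape pair in place with del (each deletion shifting the tail of the mutated frame); B never mutates: it makes one left-to-right pass over each frame, copying kept elements into a fresh result list and skipping the two escape elements when trama[i:i+4] == ['7','D','7','E'].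
import Mathlib
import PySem

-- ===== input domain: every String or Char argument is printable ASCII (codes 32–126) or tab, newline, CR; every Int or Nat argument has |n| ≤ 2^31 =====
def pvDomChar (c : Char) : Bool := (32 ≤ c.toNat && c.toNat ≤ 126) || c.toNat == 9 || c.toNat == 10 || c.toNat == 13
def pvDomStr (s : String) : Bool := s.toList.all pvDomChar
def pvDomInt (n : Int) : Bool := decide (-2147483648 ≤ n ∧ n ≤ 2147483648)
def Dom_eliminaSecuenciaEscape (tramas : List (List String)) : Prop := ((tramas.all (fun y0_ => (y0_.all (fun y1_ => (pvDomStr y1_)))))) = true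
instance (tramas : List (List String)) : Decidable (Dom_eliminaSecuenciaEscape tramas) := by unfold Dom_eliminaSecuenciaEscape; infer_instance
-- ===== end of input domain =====

-- B replaces A's repeated in-place deletions with a single left-to-right pass that copies
-- kept elements into a fresh list (objective: alternative). A mutates the inner lists of
-- its argument in place; B does not — the equivalence proved here is about the return value.

-- ===== PORT A =====
-- 'del l[i]' for an in-range i
def pvDelAt (l : List String) (i : Nat) : List String := l.take i ++ l.drop (i + 1)

theorem pvDelAt_length (l : List String) (i : Nat) (h : i < l.length) :
    (pvDelAt l i).length = l.length - 1 := by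
  simp [pvDelAt]; omega

-- the 'while i < len(trama) - 3' loop of A, mutating trama via del
def pvLoopA (trama : List String) (i : Nat) : List String :=
  if _h : i < trama.length - 3 then
    if trama.getD i "" = "7" ∧ trama.getD (i + 1) "" = "D" ∧
       trama.getD (i + 2) "" = "7" ∧ trama.getD (i + 3) "" = "E" then
      pvLoopA (pvDelAt (pvDelAt trama i) i) i
    else
      pvLoopA trama (i + 1)
  else trama
termination_by trama.length - i
decreasing_by
  · have h1 : i < trama.length := by omega
    have h2 := pvDelAt_length trama i h1
    have h3 : i < (pvDelAt trama i).length := by omega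
    have h4 := pvDelAt_length (pvDelAt trama i) i h3
    omega
  · omega

def eliminaSecuenciaEscape (tramas : List (List String)) : List (List String) :=
  tramas.foldl (fun newTramas trama => newTramas ++ [pvLoopA trama 0]) []

-- ===== PORT B =====
-- B's while loop: single pass, skipping "7","D" when trama[i:i+4] == ["7","D","7","E"]
def pvLoopB (trama : List String) (i : Nat) (res : List String) : List String :=
  if _h : i < trama.length then
    if PySem.List.slice trama (some (i : Int)) (some ((i : Int) + 4)) = ["7", "D", "7", "E"] then
      pvLoopB trama (i + 2) res
    else
      pvLoopB trama (i + 1) (res ++ [trama.getD i ""])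
  else res
termination_by trama.length - i

def eliminaSecuenciaEscape_alt (tramas : List (List String)) : List (List String) :=
  tramas.foldl (fun newTramas trama => newTramas ++ [pvLoopB trama 0 []]) []

-- ===== PRECONDITION & SPEC =====
def Spec_eliminaSecuenciaEscape (tramas : List (List String)) (out : List (List String)) : Prop := out = eliminaSecuenciaEscape_alt tramas
instance (tramas : List (List String)) (out : List (List String)) : Decidable (Spec_eliminaSecuenciaEscape tramas out) := by unfold Spec_eliminaSecuenciaEscape; infer_instance

-- ===== CLAIM (what is proved, stated in full; the proofs are below) =====
def Claim_equal_eliminaSecuenciaEscape : Prop := ∀ (tramas : List (List String)), Dom_eliminaSecuenciaEscape tramas → Spec_eliminaSecuenciaEscape tramas (eliminaSecuenciaEscape tramas)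

-- ===== LEMMAS AND PROOFS =====

-- canonical one-suffix-at-a-time description both loops satisfy
def pvCanon : List String → List String
  | [] => []
  | a :: rest =>
    if (a :: rest).take 4 = ["7", "D", "7", "E"] then pvCanon (rest.drop 1)
    else a :: pvCanon rest
termination_by l => l.length
decreasing_by
  all_goals simp

theorem pvCanon_nil : pvCanon [] = [] := by simp [pvCanon]

theorem pvTake4 (x0 x1 x2 x3 : String) (r : List String) :
    List.take 4 (x0 :: x1 :: x2 :: x3 :: r) = [x0, x1, x2, x3] := rfl

theorem pvCanon_step (r : List String) :
    pvCanon ("7" :: "D" :: "7" :: "E" :: r) = pvCanon ("7" :: "E" :: r) := by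
  conv_lhs => rw [pvCanon]
  simp

theorem pvCanon_cons_ne (a : String) (r : List String)
    (h : (a :: r).take 4 ≠ ["7", "D", "7", "E"]) : pvCanon (a :: r) = a :: pvCanon r := by
  conv_lhs => rw [pvCanon]
  rw [if_neg h]

theorem pvCanon_short (l : List String) (h : l.length < 4) : pvCanon l = l := by
  induction l with
  | nil => simp [pvCanon]
  | cons a rest ih =>
    have hr : rest.length < 4 := by simp only [List.length_cons] at h; omega
    have hne : (a :: rest).take 4 ≠ ["7", "D", "7", "E"] := by
      intro he
      have h' : rest.length + 1 < 4 := by simpa using h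
      have := congrArg List.length he
      simp only [List.length_take, List.length_cons, List.length_nil] at this
      omega
    rw [pvCanon_cons_ne a rest hne, ih hr]

theorem pvDelAt2 (t : List String) (i : Nat) (h : i + 1 < t.length) :
    pvDelAt (pvDelAt t i) i = t.take i ++ t.drop (i + 2) := by
  have hlen : (t.take i).length = i := by simp; omega
  simp only [pvDelAt, List.take_append, List.drop_append, List.take_take, List.drop_drop, hlen]
  rw [List.drop_eq_nil_of_le (by omega : (t.take i).length ≤ i + 1)]
  simp

theorem pvLoopA_eq (trama : List String) (i : Nat) :
    pvLoopA trama i = trama.take i ++ pvCanon (trama.drop i) := by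
  fun_induction pvLoopA trama i with
  | case1 trama i h hc ih =>
    have h0 : i < trama.length := by omega
    have h1 : i + 1 < trama.length := by omega
    have h2 : i + 2 < trama.length := by omega
    have h3 : i + 3 < trama.length := by omega
    obtain ⟨c0, c1, c2, c3⟩ := hc
    rw [List.getD_eq_getElem trama "" h0] at c0
    rw [List.getD_eq_getElem trama "" h1] at c1
    rw [List.getD_eq_getElem trama "" h2] at c2
    rw [List.getD_eq_getElem trama "" h3] at c3
    have hd : trama.drop i = "7" :: "D" :: "7" :: "E" :: trama.drop (i + 4) := by
      rw [List.drop_eq_getElem_cons h0, List.drop_eq_getElem_cons h1,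
          List.drop_eq_getElem_cons h2, List.drop_eq_getElem_cons h3, c0, c1, c2, c3]
    have hd2 : trama.drop (i + 2) = "7" :: "E" :: trama.drop (i + 4) := by
      rw [List.drop_eq_getElem_cons h2, List.drop_eq_getElem_cons h3, c2, c3]
    have hdel := pvDelAt2 trama i h1
    have htk : (pvDelAt (pvDelAt trama i) i).take i = trama.take i := by
      rw [hdel]
      have hlen : (trama.take i).length = i := by simp; omega
      simp [hlen]
    have hdr : (pvDelAt (pvDelAt trama i) i).drop i = trama.drop (i + 2) := by
      rw [hdel]
      have hlen : (trama.take i).length = i := by simp; omega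
      simp [hlen]
    rw [ih, htk, hdr, hd2, hd, ← pvCanon_step]
  | case2 trama i h hc ih =>
    have h0 : i < trama.length := by omega
    have h1 : i + 1 < trama.length := by omega
    have h2 : i + 2 < trama.length := by omega
    have h3 : i + 3 < trama.length := by omega
    have hd : trama.drop (i + 1) = trama[i+1] :: trama[i+2] :: trama[i+3] :: trama.drop (i + 4) := by
      rw [List.drop_eq_getElem_cons h1, List.drop_eq_getElem_cons h2, List.drop_eq_getElem_cons h3]
    have hne : (trama[i] :: trama.drop (i + 1)).take 4 ≠ ["7", "D", "7", "E"] := by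
      intro he
      rw [hd, pvTake4] at he
      simp only [List.cons.injEq, and_true] at he
      exact hc ⟨by rw [List.getD_eq_getElem trama "" h0]; exact he.1,
                by rw [List.getD_eq_getElem trama "" h1]; exact he.2.1,
                by rw [List.getD_eq_getElem trama "" h2]; exact he.2.2.1,
                by rw [List.getD_eq_getElem trama "" h3]; exact he.2.2.2⟩
    have ht : trama.take (i + 1) = trama.take i ++ [trama[i]] := by
      rw [List.take_add_one, List.getElem?_eq_getElem h0]
      simp
    rw [ih, ht, List.drop_eq_getElem_cons h0, pvCanon_cons_ne _ _ hne, List.append_assoc]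
    simp
  | case3 trama i h =>
    have : (trama.drop i).length < 4 := by simp; omega
    rw [pvCanon_short _ this]
    simp

theorem pvLoopB_eq (trama : List String) (i : Nat) (res : List String) :
    pvLoopB trama i res = res ++ pvCanon (trama.drop i) := by
  fun_induction pvLoopB trama i res with
  | case1 i res h hc ih =>
    have hsl : (trama.drop i).take 4 = ["7", "D", "7", "E"] := by
      rw [← hc]
      have hcast : ((i : Int) + 4) = ((i + 4 : Nat) : Int) := by push_cast; ring
      rw [hcast, PySem.List.slice_natCast]
      congr 1
      omega
    have hlen : 4 ≤ (trama.drop i).length := by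
      have := congrArg List.length hsl
      simp only [List.length_take, List.length_cons, List.length_nil] at this
      omega
    rw [ih]
    congr 1
    match hm : trama.drop i with
    | [] => rw [hm] at hlen; simp at hlen
    | a :: rest =>
      rw [hm] at hsl
      conv_rhs => rw [pvCanon]
      rw [if_pos hsl]
      have : trama.drop (i + 2) = (trama.drop i).drop 2 := by rw [List.drop_drop]
      rw [this, hm]
      simp
  | case2 i res h hc ih =>
    have hsl : (trama.drop i).take 4 ≠ ["7", "D", "7", "E"] := by
      intro he
      apply hc
      have hcast : ((i : Int) + 4) = ((i + 4 : Nat) : Int) := by push_cast; ring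
      rw [hcast, PySem.List.slice_natCast, ← he]
      congr 1
      omega
    rw [ih, List.drop_eq_getElem_cons h]
    rw [List.drop_eq_getElem_cons h] at hsl
    rw [pvCanon_cons_ne _ _ hsl, List.getD_eq_getElem trama "" h]
    simp
  | case3 i res h =>
    have : trama.drop i = [] := List.drop_eq_nil_of_le (by omega)
    rw [this, pvCanon_nil]
    simp

-- ===== VERDICT (by name: the statement is the Claim_ definition above) =====
theorem eliminaSecuenciaEscape_spec : Claim_equal_eliminaSecuenciaEscape := by
  intro tramas _
  unfold Spec_eliminaSecuenciaEscape eliminaSecuenciaEscape eliminaSecuenciaEscape_alt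
  rw [PySem.List.foldl_append_singleton_eq_map, PySem.List.foldl_append_singleton_eq_map]
  simp only [List.nil_append]
  apply List.map_congr_left
  intro t _
  rw [pvLoopA_eq, pvLoopB_eq]
  simp
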